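-- pv_equiv track=rewrite | github.com/francocuervoo/ip | parciales/parcial_02/submission.py | hay_dos_operadores_juntos
-- ===== SOURCE A (Python) =====
-- def hay_dos_operadores_juntos ( s : str) -> bool:
--     contador : int = 0
--
--     for r in s:
--         if contador > 1:
--             return True
--
--         if r == "+" or r == "-":
--             contador +=1
--
--         else:
--             contador = 0
--
--     if contador > 1:
--         return True
--
--     return False
-- ===== SOURCE B (Python) =====
-- def hay_dos_operadores_juntos(s: str) -> bool:
--     return any(a in "+-" and b in "+-" for a, b in zip(s, s[1:]))
-- ===== Notes on version B (the rewrite author's own statement) =====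
-- stated objective: simpler
-- what changed: Replaces the running consecutive-operator counter state machine with a stateless any() over adjacent character pairs (zip of the string with its tail).
import Mathlib
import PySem

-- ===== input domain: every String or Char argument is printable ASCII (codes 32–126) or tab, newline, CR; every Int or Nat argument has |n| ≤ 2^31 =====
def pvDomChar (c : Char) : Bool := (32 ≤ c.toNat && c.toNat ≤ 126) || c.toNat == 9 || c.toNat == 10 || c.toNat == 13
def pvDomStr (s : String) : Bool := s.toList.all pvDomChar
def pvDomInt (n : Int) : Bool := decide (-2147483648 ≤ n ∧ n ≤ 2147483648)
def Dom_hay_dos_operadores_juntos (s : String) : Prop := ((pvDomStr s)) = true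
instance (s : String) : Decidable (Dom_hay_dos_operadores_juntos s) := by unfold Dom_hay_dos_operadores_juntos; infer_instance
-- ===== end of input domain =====

-- B replaces A's running consecutive-operator counter with a stateless scan of adjacent
-- character pairs (simpler decomposition, same O(n) cost).


-- ===== PORT A =====
-- loop with early return: recursion over the chars carrying the counter
def hayALoop : List Char → Int → Bool
  | [], contador => decide (contador > 1)
  | r :: rest, contador =>
    if contador > 1 then true
    else if r = '+' ∨ r = '-' then hayALoop rest (contador + 1)
    else hayALoop rest 0

def hay_dos_operadores_juntos (s : String) : Bool := hayALoop s.toList 0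

-- ===== PORT B =====
-- B: any over adjacent pairs (zip of s with s[1:], which for a string is its tail)
def hay_dos_operadores_juntos_alt (s : String) : Bool :=
  (s.toList.zip s.toList.tail).any (fun p => (p.1 = '+' || p.1 = '-') && (p.2 = '+' || p.2 = '-'))

-- ===== PRECONDITION & SPEC =====
def Spec_hay_dos_operadores_juntos (s : String) (out : Bool) : Prop := out = hay_dos_operadores_juntos_alt s
instance (s : String) (out : Bool) : Decidable (Spec_hay_dos_operadores_juntos s out) := by unfold Spec_hay_dos_operadores_juntos; infer_instance

-- ===== CLAIM (what is proved, stated in full; the proofs are below) =====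
def Claim_equal_hay_dos_operadores_juntos : Prop := ∀ (s : String), Dom_hay_dos_operadores_juntos s → Spec_hay_dos_operadores_juntos s (hay_dos_operadores_juntos s)

-- ===== LEMMAS AND PROOFS =====

def isOp (c : Char) : Bool := c = '+' || c = '-'

def anyPair (l : List Char) : Bool :=
  (l.zip l.tail).any (fun p => (p.1 = '+' || p.1 = '-') && (p.2 = '+' || p.2 = '-'))

def headOp : List Char → Bool
  | [] => false
  | r :: _ => isOp r

theorem anyPair_cons (r : Char) (rs : List Char) :
    anyPair (r :: rs) = ((isOp r && headOp rs) || anyPair rs) := by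
  cases rs with
  | nil => simp [anyPair, headOp]
  | cons r2 rs' => simp [anyPair, headOp, isOp, List.any_cons]

theorem hayALoop_eq (l : List Char) :
    ∀ c : Int, 0 ≤ c →
      hayALoop l c = (decide (1 < c) || (decide (c = 1) && headOp l) || anyPair l) := by
  induction l with
  | nil =>
    intro c _
    simp [hayALoop, anyPair, headOp]
  | cons r rs ih =>
    intro c hc
    by_cases h1 : c > 1
    · simp [hayALoop, h1]
    · have hc01 : c = 0 ∨ c = 1 := by omega
      by_cases hop : r = '+' ∨ r = '-'
      · have hiso : isOp r = true := by
          rcases hop with h | h <;> simp [isOp, h]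
        rw [anyPair_cons]
        rcases hc01 with h0 | h0 <;> simp [hayALoop, hop, ih, h0, hiso, headOp]
      · have hiso : isOp r = false := by
          simp only [isOp, Bool.or_eq_false_iff, decide_eq_false_iff_not]
          push Not at hop
          exact hop
        rw [anyPair_cons]
        rcases hc01 with h0 | h0 <;>
          simp [hayALoop, hop, ih, h0, hiso, headOp]

-- ===== VERDICT (by name: the statement is the Claim_ definition above) =====
theorem hay_dos_operadores_juntos_spec : Claim_equal_hay_dos_operadores_juntos := by
  intro s _
  show hay_dos_operadores_juntos s = hay_dos_operadores_juntos_alt s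
  rw [hay_dos_operadores_juntos, hayALoop_eq _ 0 (by norm_num)]
  simp [hay_dos_operadores_juntos_alt, anyPair]
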